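-- pv_equiv track=rewrite | github.com/KariraLakshya/threat-hunter | response/response_engine.py | _is_cross_env
-- ===== SOURCE A (Python) =====
-- from typing import Dict, List, Optional, Any
--
-- def _is_cross_env(chain: List[Dict]) -> bool:
--     """
--     True only when the chain has events from BOTH on-prem AND cloud.
--     The old approach checked the cross_environment flag per step, but the
--     correlation engine sets that flag on ALL events for a user once a
--     cross-env pattern is detected — so every incident was tagged cross-env.
--     """
--     all_envs: set = set()
--     for step in chain:
--         for env in step.get("environment", []):
--             all_envs.add(env)
--     has_onprem = any(e.startswith("on-") or e == "on-premise" for e in all_envs)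
--     has_cloud  = any(e in ("aws", "azure", "gcp") for e in all_envs)
--     return has_onprem and has_cloud
-- ===== SOURCE B (Python) =====
-- from typing import Dict, List
--
--
-- def _is_cross_env(chain: List[Dict]) -> bool:
--     has_onprem = False
--     has_cloud = False
--     for step in chain:
--         for env in step.get("environment", []):
--             if env.startswith("on-") or env == "on-premise":
--                 has_onprem = True
--             elif env in ("aws", "azure", "gcp"):
--                 has_cloud = True
--             if has_onprem and has_cloud:
--                 return True
--     return False
-- ===== Notes on version B (the rewrite author's own statement) =====
-- stated objective: simpler
-- what changed: Instead of materializing a set of all environments and then running two separate any-scans over it, B does one fused pass over the steps' environment lists maintaining two booleans and returns True early once both are set.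
import Mathlib
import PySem

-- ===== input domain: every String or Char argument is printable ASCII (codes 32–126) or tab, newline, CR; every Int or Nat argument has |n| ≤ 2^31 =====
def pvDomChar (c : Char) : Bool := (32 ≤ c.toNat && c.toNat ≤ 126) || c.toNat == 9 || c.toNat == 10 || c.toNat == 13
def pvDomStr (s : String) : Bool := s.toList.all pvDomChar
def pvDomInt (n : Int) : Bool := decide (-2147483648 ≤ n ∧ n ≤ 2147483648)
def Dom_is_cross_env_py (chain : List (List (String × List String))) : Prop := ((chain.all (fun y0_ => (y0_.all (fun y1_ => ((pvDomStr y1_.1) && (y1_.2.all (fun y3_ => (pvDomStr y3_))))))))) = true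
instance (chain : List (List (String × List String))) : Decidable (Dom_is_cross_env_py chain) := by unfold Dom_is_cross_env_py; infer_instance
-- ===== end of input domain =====

-- B drops A's intermediate set: one fused pass keeping two booleans, with an early return once both hold (objective: simpler).

-- ===== PORT A =====
-- all_envs built by adding every env of every step to a set, then two any-scans over the set
def is_cross_env_py (chain : List (List (String × List String))) : Bool :=
  let allEnvs : PySem.Set String :=
    chain.foldl
      (fun acc step =>
        (PySem.Dict.getD (PySem.Dict.mk step) "environment" []).foldl
          (fun s env => PySem.Set.add s env) acc)
      PySem.Set.empty
  let hasOnprem := allEnvs.any (fun e => PySem.Str.startswith e "on-" || e == "on-premise")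
  let hasCloud := allEnvs.any (fun e => e == "aws" || e == "azure" || e == "gcp")
  hasOnprem && hasCloud

-- ===== PORT B =====
-- inner loop of B: walk one step's environment list, updating the two flags, stopping once both are set
def crossEnvStep : List String → Bool → Bool → Bool × Bool
  | [], ho, hc => (ho, hc)
  | e :: rest, ho, hc =>
    let onp := PySem.Str.startswith e "on-" || e == "on-premise"
    let ho' := ho || onp
    let hc' := hc || (!onp && (e == "aws" || e == "azure" || e == "gcp"))
    if ho' && hc' then (ho', hc') else crossEnvStep rest ho' hc'

-- outer loop of B over the chain's steps
def crossEnvChain : List (List (String × List String)) → Bool → Bool → Bool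
  | [], ho, hc => ho && hc
  | step :: rest, ho, hc =>
    let (ho', hc') := crossEnvStep (PySem.Dict.getD (PySem.Dict.mk step) "environment" []) ho hc
    if ho' && hc' then true else crossEnvChain rest ho' hc'

def is_cross_env_py_alt (chain : List (List (String × List String))) : Bool :=
  crossEnvChain chain false false

-- ===== PRECONDITION & SPEC =====
def Spec_is_cross_env_py (chain : List (List (String × List String))) (out : Bool) : Prop := out = is_cross_env_py_alt chain
instance (chain : List (List (String × List String))) (out : Bool) : Decidable (Spec_is_cross_env_py chain out) := by unfold Spec_is_cross_env_py; infer_instance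

-- ===== CLAIM (what is proved, stated in full; the proofs are below) =====
def Claim_equal_is_cross_env_py : Prop := ∀ (chain : List (List (String × List String))), Dom_is_cross_env_py chain → Spec_is_cross_env_py chain (is_cross_env_py chain)

-- ===== LEMMAS AND PROOFS =====

-- the two predicates, and the flat list of all environments of the chain
def pvOnP (e : String) : Bool := PySem.Str.startswith e "on-" || e == "on-premise"
def pvCld (e : String) : Bool := e == "aws" || e == "azure" || e == "gcp"
def pvEnvs (chain : List (List (String × List String))) : List String :=
  chain.flatMap (fun step => PySem.Dict.getD (PySem.Dict.mk step) "environment" [])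

-- the three cloud literals do not satisfy the on-prem predicate
theorem pvCld_not_onp (e : String) (h : pvCld e = true) : pvOnP e = false := by
  unfold pvCld at h
  rcases Bool.or_eq_true_iff.mp h with h' | h'
  · rcases Bool.or_eq_true_iff.mp h' with h'' | h''
    · have : e = "aws" := by simpa using h''
      subst this; decide
    · have : e = "azure" := by simpa using h''
      subst this; decide
  · have : e = "gcp" := by simpa using h'
    subst this; decide

-- membership in the set A builds = membership in the flat env list
theorem pvMem_setfold (chain : List (List (String × List String))) (s : PySem.Set String) (x : String) :
    (x ∈ chain.foldl
      (fun acc step =>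
        (PySem.Dict.getD (PySem.Dict.mk step) "environment" []).foldl
          (fun t env => PySem.Set.add t env) acc) s)
    ↔ x ∈ s ∨ x ∈ pvEnvs chain := by
  induction chain generalizing s with
  | nil => simp [pvEnvs]
  | cons step rest ih =>
    have hset : ∀ (l : List String) (t : PySem.Set String),
        (x ∈ l.foldl (fun t env => PySem.Set.add t env) t) ↔ x ∈ t ∨ x ∈ l := by
      intro l
      induction l with
      | nil => simp
      | cons a l ihl =>
        intro t
        simp only [List.foldl_cons, ihl, PySem.Set.mem_add, List.mem_cons]
        tauto
    simp only [List.foldl_cons, pvEnvs, List.flatMap_cons, List.mem_append]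
    rw [ih, hset]
    unfold pvEnvs
    tauto

-- A computes (any onprem over envs) && (any cloud over envs)
theorem pvA_char (chain : List (List (String × List String))) :
    is_cross_env_py chain = ((pvEnvs chain).any pvOnP && (pvEnvs chain).any pvCld) := by
  have hany : ∀ (p : String → Bool),
      (chain.foldl
        (fun acc step =>
          (PySem.Dict.getD (PySem.Dict.mk step) "environment" []).foldl
            (fun t env => PySem.Set.add t env) acc) PySem.Set.empty).any p
      = (pvEnvs chain).any p := by
    intro p
    rw [Bool.eq_iff_iff]
    simp only [List.any_eq_true]
    constructor
    · rintro ⟨x, hx, hp⟩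
      rcases (pvMem_setfold chain PySem.Set.empty x).mp hx with h | h
      · simp [PySem.Set.empty] at h
      · exact ⟨x, h, hp⟩
    · rintro ⟨x, hx, hp⟩
      exact ⟨x, (pvMem_setfold chain PySem.Set.empty x).mpr (Or.inr hx), hp⟩
  show ((chain.foldl _ PySem.Set.empty).any _ && (chain.foldl _ PySem.Set.empty).any _) = _
  rw [hany, hany]
  rfl

-- B's inner loop accumulates the two any-scans over one step's env list
theorem pvStep_char (l : List String) (ho hc : Bool) :
    crossEnvStep l ho hc = (ho || l.any pvOnP, hc || l.any pvCld) := by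
  induction l generalizing ho hc with
  | nil => simp [crossEnvStep]
  | cons e rest ih =>
    have hhc : (hc || (!(PySem.Str.startswith e "on-" || e == "on-premise")
        && (e == "aws" || e == "azure" || e == "gcp"))) = (hc || pvCld e) := by
      cases h : (e == "aws" || e == "azure" || e == "gcp")
      · simp [pvCld, h]
      · have honp : pvOnP e = false := pvCld_not_onp e (by simpa [pvCld] using h)
        unfold pvOnP at honp
        rw [honp]
        simp [pvCld, h]
    show (if ((ho || (PySem.Str.startswith e "on-" || e == "on-premise"))
            && (hc || (!(PySem.Str.startswith e "on-" || e == "on-premise")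
                && (e == "aws" || e == "azure" || e == "gcp")))) = true
          then (ho || (PySem.Str.startswith e "on-" || e == "on-premise"),
                hc || (!(PySem.Str.startswith e "on-" || e == "on-premise")
                  && (e == "aws" || e == "azure" || e == "gcp")))
          else crossEnvStep rest (ho || (PySem.Str.startswith e "on-" || e == "on-premise"))
            (hc || (!(PySem.Str.startswith e "on-" || e == "on-premise")
              && (e == "aws" || e == "azure" || e == "gcp")))) = _
    rw [hhc]
    have hho : (ho || (PySem.Str.startswith e "on-" || e == "on-premise")) = (ho || pvOnP e) := rfl
    rw [hho]
    by_cases hb : ((ho || pvOnP e) && (hc || pvCld e)) = true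
    · rw [if_pos hb]
      rcases Bool.and_eq_true_iff.mp hb with ⟨h1, h2⟩
      simp only [List.any_cons]
      rw [← Bool.or_assoc, h1, ← Bool.or_assoc, h2]
      simp
    · rw [if_neg hb, ih]
      simp [Bool.or_assoc]

-- B's outer loop accumulates the two any-scans over the whole chain
theorem pvChain_char (chain : List (List (String × List String))) (ho hc : Bool) :
    crossEnvChain chain ho hc = ((ho || (pvEnvs chain).any pvOnP) && (hc || (pvEnvs chain).any pvCld)) := by
  induction chain generalizing ho hc with
  | nil => simp [crossEnvChain, pvEnvs]
  | cons step rest ih =>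
    show (let (ho', hc') := crossEnvStep (PySem.Dict.getD (PySem.Dict.mk step) "environment" []) ho hc
          if ho' && hc' then true else crossEnvChain rest ho' hc') = _
    rw [pvStep_char]
    simp only [pvEnvs, List.flatMap_cons, List.any_append]
    by_cases hb : ((ho || (PySem.Dict.getD (PySem.Dict.mk step) "environment" []).any pvOnP)
        && (hc || (PySem.Dict.getD (PySem.Dict.mk step) "environment" []).any pvCld)) = true
    · rw [if_pos hb]
      rcases Bool.and_eq_true_iff.mp hb with ⟨h1, h2⟩
      rw [← Bool.or_assoc, h1, ← Bool.or_assoc, h2]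
      simp
    · rw [if_neg hb, ih]
      unfold pvEnvs
      simp [Bool.or_assoc]

-- ===== VERDICT (by name: the statement is the Claim_ definition above) =====
theorem is_cross_env_py_spec : Claim_equal_is_cross_env_py := by
  intro chain _
  unfold Spec_is_cross_env_py is_cross_env_py_alt
  rw [pvA_char, pvChain_char]
  simp
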